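-- pv_equiv track=rewrite | github.com/bmeaut/GenAiAutomationExperiments | BugFixingAnalysis/llm_bug_analysis/core/context_extraction.py | _extract_simple_context
-- ===== SOURCE A (Python) =====
-- from typing import Dict, Any, Set, List, Tuple
--
-- def _extract_simple_context(
--
--     buggy_code_lines: List[str],
--     changed_ranges: List[Tuple[int, int]],
--     file_path: str,
--     max_tokens: int,
-- ) -> Dict[str, str]:
--     """
--     Fallback: extract lines around changes when AST parsing fails.
--     """
--     context_lines = set()
--     context_margin = 20  # lines before and after each change
--
--     for start, end in changed_ranges:
--         for line_num in range(
--             max(1, start - context_margin),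
--             min(len(buggy_code_lines) + 1, end + context_margin + 1),
--         ):
--             context_lines.add(line_num - 1)  # convert to 0-based
--
--     # estimate tokens and truncate if needed
--     selected_lines = sorted(context_lines)
--     if len(selected_lines) * 10 > max_tokens:  # rough estimate: 10 tokens per line
--         # take lines closest to changes
--         selected_lines = selected_lines[: max_tokens // 10]
--
--     if selected_lines:
--         snippet = "\n".join(
--             f"{i+1:4d}: {buggy_code_lines[i]}" for i in selected_lines
--         )
--         return {f"Context around changes in {file_path}": snippet}
--
--     return {}
-- ===== SOURCE B (Python) =====
-- def _extract_simple_context(buggy_code_lines, changed_ranges, file_path, max_tokens):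
--     # Clamp each changed range to a 0-based interval, sort, and sweep once,
--     # emitting only the indices above the highest line already covered —
--     # no per-line set and no final sort.
--     n = len(buggy_code_lines)
--     intervals = sorted(
--         ((max(1, start - 20) - 1, min(n, end + 20) - 1) for start, end in changed_ranges),
--         key=lambda t: t[0],
--     )
--     selected_lines = []
--     last = -1
--     for lo, hi in intervals:
--         selected_lines.extend(range(max(lo, last + 1), hi + 1))
--         last = max(last, hi)
--     if len(selected_lines) * 10 > max_tokens:
--         selected_lines = selected_lines[: max_tokens // 10]
--     if selected_lines:
--         snippet = "\n".join(
--             f"{i+1:4d}: {buggy_code_lines[i]}" for i in selected_lines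
--         )
--         return {f"Context around changes in {file_path}": snippet}
--     return {}
-- ===== Notes on version B (the rewrite author's own statement) =====
-- stated objective: alternative
-- what changed: Replaces the per-line set accumulated range-by-range and then sorted with clamped intervals sorted by start and a single sweep that emits only indices above the highest line already covered; truncation and formatting unchanged.
import Mathlib
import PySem

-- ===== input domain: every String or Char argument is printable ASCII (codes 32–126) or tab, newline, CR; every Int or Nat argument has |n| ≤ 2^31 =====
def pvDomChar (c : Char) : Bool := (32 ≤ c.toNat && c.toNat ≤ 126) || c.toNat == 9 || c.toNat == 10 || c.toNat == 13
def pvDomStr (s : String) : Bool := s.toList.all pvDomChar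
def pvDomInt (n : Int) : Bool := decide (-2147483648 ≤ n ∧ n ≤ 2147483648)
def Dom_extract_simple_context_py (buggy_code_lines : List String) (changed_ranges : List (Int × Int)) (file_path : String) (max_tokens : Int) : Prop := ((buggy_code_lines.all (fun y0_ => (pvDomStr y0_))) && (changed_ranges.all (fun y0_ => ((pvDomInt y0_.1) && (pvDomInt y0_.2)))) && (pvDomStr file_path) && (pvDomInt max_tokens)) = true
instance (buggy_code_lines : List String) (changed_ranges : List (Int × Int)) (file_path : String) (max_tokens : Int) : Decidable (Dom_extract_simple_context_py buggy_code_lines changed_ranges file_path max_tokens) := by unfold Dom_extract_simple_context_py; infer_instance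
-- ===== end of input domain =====

-- B replaces A's per-line set accumulation + final sort by clamping each changed
-- range to one interval, sorting the intervals by start, and sweeping them once,
-- emitting only indices above the highest line already covered (objective:
-- alternative); the token-budget truncation and the snippet formatting are the
-- identical code in both sources, shared below as pvFinish.

-- shared helpers: `f"{i+1:4d}: {buggy_code_lines[i]}"` (the {:4d} right-justify is
-- hand-ported: space padding of str(i+1) to width 4 — exact for this format spec);
-- the index i is always in range, so pyGetD's default "" is never used.
def pvLine (buggy_code_lines : List String) (i : Int) : String :=
  String.ofList (List.replicate (4 - (PySem.Int.toChars (i + 1)).length) ' '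
    ++ PySem.Int.toChars (i + 1)
    ++ (':' :: ' ' :: (PySem.List.pyGetD buggy_code_lines i "").toList))

-- the truncation + formatting + dict-return tail, identical in Source A and Source B
def pvFinish (buggy_code_lines : List String) (file_path : String) (max_tokens : Int)
    (selected : List Int) : List (String × String) :=
  let selected :=
    if (selected.length : Int) * 10 > max_tokens then
      PySem.List.slice selected none (some (PySem.Int.floordiv max_tokens 10))
    else selected
  if selected = [] then []
  else [("Context around changes in " ++ file_path,
         PySem.Str.join "\n" (selected.map (fun i => pvLine buggy_code_lines i)))]

-- ===== PORT A =====
-- A-side helpers: the inner `for line_num in range(...)` loop adding line_num-1 to the set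
def pvInner (n : Int) (r : Int × Int) (s : PySem.Set Int) : PySem.Set Int :=
  (PySem.List.pyRange (max 1 (r.1 - 20)) (min (n + 1) (r.2 + 20 + 1)) 1).foldl
    (fun s ln => PySem.Set.add s (ln - 1)) s

def pvBuild (n : Int) (changed_ranges : List (Int × Int)) (s : PySem.Set Int) : PySem.Set Int :=
  changed_ranges.foldl (fun s r => pvInner n r s) s

def extract_simple_context_py (buggy_code_lines : List String) (changed_ranges : List (Int × Int)) (file_path : String) (max_tokens : Int) : List (String × String) :=
  let context_lines : PySem.Set Int :=
    pvBuild (buggy_code_lines.length : Int) changed_ranges PySem.Set.empty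
  let selected_lines := PySem.List.sorted context_lines (fun x => x) false
  pvFinish buggy_code_lines file_path max_tokens selected_lines

-- ===== PORT B =====
-- B-side helper: one sweep step — `selected_lines.extend(range(max(lo, last+1), hi+1)); last = max(last, hi)`
def pvStep (acc : List Int × Int) (p : Int × Int) : List Int × Int :=
  (acc.1 ++ PySem.List.pyRange (max p.1 (acc.2 + 1)) (p.2 + 1) 1, max acc.2 p.2)

def extract_simple_context_py_alt (buggy_code_lines : List String) (changed_ranges : List (Int × Int)) (file_path : String) (max_tokens : Int) : List (String × String) :=
  let n := (buggy_code_lines.length : Int)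
  let intervals := PySem.List.sorted
    (changed_ranges.map (fun r => (max 1 (r.1 - 20) - 1, min n (r.2 + 20) - 1)))
    (fun t => t.1) false
  let selected_lines := (intervals.foldl pvStep ([], -1)).1
  pvFinish buggy_code_lines file_path max_tokens selected_lines

-- ===== PRECONDITION & SPEC =====
def Spec_extract_simple_context_py (buggy_code_lines : List String) (changed_ranges : List (Int × Int)) (file_path : String) (max_tokens : Int) (out : List (String × String)) : Prop := out = extract_simple_context_py_alt buggy_code_lines changed_ranges file_path max_tokens
instance (buggy_code_lines : List String) (changed_ranges : List (Int × Int)) (file_path : String) (max_tokens : Int) (out : List (String × String)) : Decidable (Spec_extract_simple_context_py buggy_code_lines changed_ranges file_path max_tokens out) := by unfold Spec_extract_simple_context_py; infer_instance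

-- ===== CLAIM (what is proved, stated in full; the proofs are below) =====
def Claim_equal_extract_simple_context_py : Prop := ∀ (buggy_code_lines : List String) (changed_ranges : List (Int × Int)) (file_path : String) (max_tokens : Int), Dom_extract_simple_context_py buggy_code_lines changed_ranges file_path max_tokens → Spec_extract_simple_context_py buggy_code_lines changed_ranges file_path max_tokens (extract_simple_context_py buggy_code_lines changed_ranges file_path max_tokens)

-- ===== LEMMAS AND PROOFS =====

theorem pv_mem_addFold (l : List Int) (s : PySem.Set Int) (x : Int) :
    x ∈ l.foldl (fun s ln => PySem.Set.add s (ln - 1)) s ↔ x ∈ s ∨ ∃ y ∈ l, x = y - 1 := by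
  induction l generalizing s with
  | nil => simp
  | cons a l ih =>
    simp only [List.foldl_cons, ih, PySem.Set.mem_add, List.mem_cons]
    constructor
    · rintro ((h | h) | ⟨y, hy, rfl⟩)
      · exact Or.inl h
      · exact Or.inr ⟨a, Or.inl rfl, h⟩
      · exact Or.inr ⟨y, Or.inr hy, rfl⟩
    · rintro (h | ⟨y, (rfl | hy), rfl⟩)
      · exact Or.inl (Or.inl h)
      · exact Or.inl (Or.inr rfl)
      · exact Or.inr ⟨y, hy, rfl⟩

theorem pv_nodup_addFold (l : List Int) (s : PySem.Set Int) (hs : s.Nodup) :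
    (l.foldl (fun s ln => PySem.Set.add s (ln - 1)) s).Nodup := by
  induction l generalizing s with
  | nil => exact hs
  | cons a l ih => exact ih _ (PySem.Set.nodup_add _ _ hs)

theorem pv_mem_build (n : Int) (rs : List (Int × Int)) (s : PySem.Set Int) (x : Int) :
    x ∈ pvBuild n rs s ↔
      x ∈ s ∨ ∃ r ∈ rs, max 1 (r.1 - 20) ≤ x + 1 ∧ x + 1 < min (n + 1) (r.2 + 20 + 1) := by
  induction rs generalizing s with
  | nil => simp [pvBuild]
  | cons r rs ih =>
    simp only [pvBuild, List.foldl_cons] at *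
    rw [ih]
    simp only [pvInner, pv_mem_addFold, PySem.List.mem_pyRange_one, List.mem_cons]
    constructor
    · rintro ((h | ⟨y, hy, rfl⟩) | ⟨q, hq, h1, h2⟩)
      · exact Or.inl h
      · exact Or.inr ⟨r, Or.inl rfl, by omega⟩
      · exact Or.inr ⟨q, Or.inr hq, h1, h2⟩
    · rintro (h | ⟨q, (rfl | hq), h1, h2⟩)
      · exact Or.inl (Or.inl h)
      · exact Or.inl (Or.inr ⟨x + 1, ⟨h1, h2⟩, by omega⟩)
      · exact Or.inr ⟨q, hq, h1, h2⟩

theorem pv_nodup_build (n : Int) (rs : List (Int × Int)) (s : PySem.Set Int) (hs : s.Nodup) :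
    (pvBuild n rs s).Nodup := by
  induction rs generalizing s with
  | nil => exact hs
  | cons r rs ih => exact ih _ (pv_nodup_addFold _ _ hs)

-- sweep invariant: over intervals sorted by start, the sweep keeps the output
-- strictly increasing and makes it cover exactly the union of the intervals
theorem pv_sweep (l : List (Int × Int)) (acc : List Int) (last : Int)
    (hsort : l.Pairwise (fun a b => a.1 ≤ b.1))
    (hle : ∀ x ∈ acc, x ≤ last)
    (hpw : acc.Pairwise (· < ·))
    (hcov : ∀ p ∈ l, ∀ x : Int, p.1 ≤ x → x ≤ last → x ∈ acc) :
    (l.foldl pvStep (acc, last)).1.Pairwise (· < ·) ∧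
      ∀ x : Int, x ∈ (l.foldl pvStep (acc, last)).1 ↔
        x ∈ acc ∨ ∃ p ∈ l, p.1 ≤ x ∧ x ≤ p.2 := by
  induction l generalizing acc last with
  | nil => simp [hpw]
  | cons p l ih =>
    rw [List.pairwise_cons] at hsort
    have hmem : ∀ x : Int,
        x ∈ acc ++ PySem.List.pyRange (max p.1 (last + 1)) (p.2 + 1) 1 ↔
          x ∈ acc ∨ (max p.1 (last + 1) ≤ x ∧ x < p.2 + 1) := by
      intro x; rw [List.mem_append, PySem.List.mem_pyRange_one]
    have hstep : List.foldl pvStep (acc, last) (p :: l) =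
        List.foldl pvStep
          (acc ++ PySem.List.pyRange (max p.1 (last + 1)) (p.2 + 1) 1, max last p.2) l := rfl
    rw [hstep]
    obtain ⟨hpw', hmem'⟩ := ih
      (acc ++ PySem.List.pyRange (max p.1 (last + 1)) (p.2 + 1) 1) (max last p.2)
      hsort.2
      (by intro x hx
          rcases (hmem x).1 hx with h | h
          · exact le_trans (hle x h) (le_max_left _ _)
          · omega)
      (by rw [List.pairwise_append]
          refine ⟨hpw, PySem.List.pairwise_lt_pyRange_one _ _, ?_⟩
          intro a ha b hb
          rw [PySem.List.mem_pyRange_one] at hb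
          have := hle a ha; omega)
      (by intro q hq x hqx hxl
          rw [hmem]
          by_cases hxlast : x ≤ last
          · exact Or.inl (hcov q (List.mem_cons_of_mem p hq) x hqx hxlast)
          · have hpq := hsort.1 q hq
            right; constructor <;> omega)
    refine ⟨hpw', fun x => ?_⟩
    rw [hmem' x, hmem x]
    constructor
    · rintro ((h | h) | ⟨q, hq, h1, h2⟩)
      · exact Or.inl h
      · exact Or.inr ⟨p, List.mem_cons_self .., by omega, by omega⟩
      · exact Or.inr ⟨q, List.mem_cons_of_mem p hq, h1, h2⟩
    · rintro (h | ⟨q, hq, h1, h2⟩)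
      · exact Or.inl (Or.inl h)
      · rcases List.mem_cons.1 hq with rfl | hq'
        · by_cases hxlast : x ≤ last
          · exact Or.inl (Or.inl (hcov q (List.mem_cons_self ..) x h1 hxlast))
          · exact Or.inl (Or.inr (by omega))
        · exact Or.inr ⟨q, hq', h1, h2⟩

-- the heart of the equivalence: sorted(set built range-by-range) = interval sweep
theorem pv_selected_eq (buggy_code_lines : List String) (changed_ranges : List (Int × Int)) :
    PySem.List.sorted (pvBuild (buggy_code_lines.length : Int) changed_ranges PySem.Set.empty)
        (fun x => x) false =
      ((PySem.List.sorted
          (changed_ranges.map (fun r => (max 1 (r.1 - 20) - 1,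
            min (buggy_code_lines.length : Int) (r.2 + 20) - 1)))
          (fun t => t.1) false).foldl pvStep ([], -1)).1 := by
  have hperm := PySem.List.sorted_perm
    (changed_ranges.map (fun r => (max 1 (r.1 - 20) - 1,
      min (buggy_code_lines.length : Int) (r.2 + 20) - 1))) (fun t => t.1) false
  obtain ⟨hpw, hmem⟩ := pv_sweep
    (PySem.List.sorted
      (changed_ranges.map (fun r => (max 1 (r.1 - 20) - 1,
        min (buggy_code_lines.length : Int) (r.2 + 20) - 1)))
      (fun t => t.1) false) [] (-1)
    (PySem.List.sorted_pairwise _ _)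
    (by simp) (by simp)
    (by intro p hp x hpx hxneg
        rw [hperm.mem_iff, List.mem_map] at hp
        obtain ⟨r, _, rfl⟩ := hp
        simp only at hpx
        omega)
  apply PySem.List.sorted_eq_of_perm_of_pairwise_lt
  · rw [List.perm_ext_iff_of_nodup
      (hpw.imp (fun h => ne_of_lt h))
      (pv_nodup_build _ _ PySem.Set.empty List.nodup_nil)]
    intro x
    rw [hmem x, pv_mem_build]
    simp only [hperm.mem_iff, List.mem_map, PySem.Set.empty, List.not_mem_nil, false_or]
    constructor
    · rintro ⟨p, ⟨r, hr, rfl⟩, h1, h2⟩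
      simp only at h1 h2
      exact ⟨r, hr, by omega, by omega⟩
    · rintro ⟨r, hr, h1, h2⟩
      exact ⟨_, ⟨r, hr, rfl⟩, by simp only; omega, by simp only; omega⟩
  · exact hpw
-- ===== VERDICT (by name: the statement is the Claim_ definition above) =====
theorem extract_simple_context_py_spec : Claim_equal_extract_simple_context_py := by
  intro buggy_code_lines changed_ranges file_path max_tokens _
  unfold Spec_extract_simple_context_py
  exact congrArg (pvFinish buggy_code_lines file_path max_tokens)
    (pv_selected_eq buggy_code_lines changed_ranges)
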